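-- pv_equiv track=rewrite | github.com/racia/research-project | prompts/Chat.py | interpr_parse_messages
-- ===== SOURCE A (Python) =====
-- def interpr_parse_messages(messages, split_role="user"):
--     """
--     Parses messages by appending new message in message_round list to message_rounds after initial system message.
--     :param messages: prompt messages
--     :param split_role: one of system/user
--     :return: system message and message_rounds list
--     """
--     system_msg, message_rounds = "", []
--     message_round = []
--     for i, message in enumerate(messages):
--         if message["role"] == "system":
--             assert i == 0
--             system_msg = message["content"]
--             continue
--         if message["role"] == split_role and message_round:
--             message_rounds.append(message_round)
--             message_round = []
--         message_round.append(message)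
--     if message_round:
--         message_rounds.append(message_round)
--     return system_msg, message_rounds
-- ===== SOURCE B (Python) =====
-- def interpr_parse_messages(messages, split_role="user"):
--     if messages and messages[0]["role"] == "system":
--         system_msg = messages[0]["content"]
--         rest = messages[1:]
--     else:
--         system_msg, rest = "", messages
--     assert all(m["role"] != "system" for m in rest)
--
--     def chop(ms):
--         if not ms:
--             return []
--         k = 1
--         while k < len(ms) and ms[k]["role"] != split_role:
--             k += 1
--         return [ms[:k]] + chop(ms[k:])
--
--     return system_msg, chop(rest)
-- ===== Notes on version B (the rewrite author's own statement) =====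
-- stated objective: alternative
-- what changed: B extracts the system message up front and validates the tail once, then builds the rounds by recursively slicing the remaining messages at split_role boundaries, instead of A's single accumulating loop with flush-on-split mutable state.
import Mathlib
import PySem

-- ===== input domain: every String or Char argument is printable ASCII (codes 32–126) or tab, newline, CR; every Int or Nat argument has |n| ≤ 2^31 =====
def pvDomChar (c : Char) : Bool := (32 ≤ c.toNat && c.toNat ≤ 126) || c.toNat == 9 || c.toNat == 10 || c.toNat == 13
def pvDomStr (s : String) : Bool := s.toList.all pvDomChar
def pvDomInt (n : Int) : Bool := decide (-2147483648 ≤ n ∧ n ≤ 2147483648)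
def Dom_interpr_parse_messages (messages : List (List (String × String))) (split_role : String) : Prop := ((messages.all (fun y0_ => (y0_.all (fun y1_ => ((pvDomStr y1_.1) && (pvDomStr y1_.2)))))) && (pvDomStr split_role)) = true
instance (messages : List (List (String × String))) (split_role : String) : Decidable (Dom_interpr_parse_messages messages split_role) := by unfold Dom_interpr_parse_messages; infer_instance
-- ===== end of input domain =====

-- B re-implements the round grouping by extracting the system message up front and
-- recursively slicing the remaining messages at split_role boundaries, instead of A's
-- single accumulating loop with flush-on-split state (objective: alternative, same cost).

-- shared primitive: message[k] lookup (first match); Pre_ guarantees the key is present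
def pvLookupD (m : List (String × String)) (k : String) : String :=
  ((PySem.Dict.mk m).get? k).getD ""

-- ===== PORT A =====
-- A-side helper: the body of A's for-loop (the index i is used only by
-- 'assert i == 0', whose failure inputs are excluded by Pre_)
def pvStepA (split_role : String)
    (st : String × List (List (List (String × String))) × List (List (String × String)))
    (message : List (String × String)) :
    String × List (List (List (String × String))) × List (List (String × String)) :=
  if pvLookupD message "role" = "system" then
    (pvLookupD message "content", st.2.1, st.2.2)
  else if pvLookupD message "role" = split_role ∧ st.2.2 ≠ [] then
    (st.1, st.2.1 ++ [st.2.2], [message])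
  else
    (st.1, st.2.1, st.2.2 ++ [message])

def interpr_parse_messages (messages : List (List (String × String))) (split_role : String) : String × (List (List (List (String × String)))) :=
  let st := (PySem.List.enumerate messages).foldl
    (fun st im => pvStepA split_role st im.2) ("", [], [])
  (st.1, if st.2.2 = [] then st.2.1 else st.2.1 ++ [st.2.2])

-- ===== PORT B =====
def pvNotSplit (split_role : String) (m : List (String × String)) : Bool :=
  pvLookupD m "role" != split_role

-- Source B's chop: first round = ms[:k] where k is the first split_role position ≥ 1
-- (the index scan 'while k < len(ms) and …' is takeWhile on the tail), then recurse on ms[k:]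
def pvChop (split_role : String) : List (List (String × String)) → List (List (List (String × String)))
  | [] => []
  | m :: t =>
      (m :: t.takeWhile (pvNotSplit split_role)) :: pvChop split_role (t.dropWhile (pvNotSplit split_role))
termination_by ms => ms.length
decreasing_by
  simp only [List.length_cons]
  exact Nat.lt_succ_of_le (List.length_dropWhile_le _ _)

def interpr_parse_messages_alt (messages : List (List (String × String))) (split_role : String) : String × (List (List (List (String × String)))) :=
  match messages with
  | [] => ("", [])
  | m0 :: rest =>
      if pvLookupD m0 "role" = "system" then
        (pvLookupD m0 "content", pvChop split_role rest)
      else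
        ("", pvChop split_role (m0 :: rest))

-- ===== PRECONDITION & SPEC =====
-- Pre_ excludes exactly the inputs on which Python A raises: a message missing the
-- "role" key (KeyError), a "system"-role message at index > 0 (AssertionError), and a
-- "system"-role first message missing the "content" key (KeyError).
def Pre_interpr_parse_messages (messages : List (List (String × String))) (split_role : String) : Prop :=
  (∀ m ∈ messages, ((PySem.Dict.mk m).get? "role").isSome) ∧
  (∀ m ∈ messages.tail, pvLookupD m "role" ≠ "system") ∧
  (∀ m ∈ messages.take 1, pvLookupD m "role" = "system" → ((PySem.Dict.mk m).get? "content").isSome)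
instance (messages : List (List (String × String))) (split_role : String) : Decidable (Pre_interpr_parse_messages messages split_role) := by unfold Pre_interpr_parse_messages; infer_instance

def pvWitness_interpr_parse_messages : (List (List (String × String))) × String :=
  ([[("role", "system"), ("content", "be nice")],
    [("role", "user"), ("content", "q1")],
    [("role", "assistant"), ("content", "a1")],
    [("role", "user"), ("content", "q2")]], "user")

def Spec_interpr_parse_messages (messages : List (List (String × String))) (split_role : String) (out : String × (List (List (List (String × String))))) : Prop := out = interpr_parse_messages_alt messages split_role
instance (messages : List (List (String × String))) (split_role : String) (out : String × (List (List (List (String × String))))) : Decidable (Spec_interpr_parse_messages messages split_role out) := by unfold Spec_interpr_parse_messages; infer_instance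

-- ===== CLAIM (what is proved, stated in full; the proofs are below) =====
def Claim_equal_interpr_parse_messages : Prop := ∀ (messages : List (List (String × String))) (split_role : String), Dom_interpr_parse_messages messages split_role → Pre_interpr_parse_messages messages split_role → Spec_interpr_parse_messages messages split_role (interpr_parse_messages messages split_role)

-- ===== LEMMAS AND PROOFS =====

-- folding A's step over enumerate ignores the index
lemma pvFoldl_enumerate {α β : Type} (g : β → α → β) :
    ∀ (l : List α) (s : Int) (st : β),
      (PySem.List.enumerate l s).foldl (fun st im => g st im.2) st = l.foldl g st := by
  intro l
  induction l with
  | nil => intro s st; rfl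
  | cons x xs ih =>
      intro s st
      simp only [PySem.List.enumerate_cons, List.foldl_cons]
      exact ih (s + 1) (g st x)

-- invariant of A's loop over a system-free suffix, with a nonempty open round
lemma pvFoldA (split_role : String) :
    ∀ (ms : List (List (String × String))) (sm : String)
      (acc : List (List (List (String × String)))) (cur : List (List (String × String))),
      cur ≠ [] → (∀ m ∈ ms, pvLookupD m "role" ≠ "system") →
      (let st := ms.foldl (pvStepA split_role) (sm, acc, cur)
       (st.1, if st.2.2 = [] then st.2.1 else st.2.1 ++ [st.2.2]))
      = (sm, acc ++ (cur ++ ms.takeWhile (pvNotSplit split_role)) ::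
               pvChop split_role (ms.dropWhile (pvNotSplit split_role))) := by
  intro ms
  induction ms with
  | nil =>
      intro sm acc cur hcur _
      simp [pvChop, hcur]
  | cons m t ih =>
      intro sm acc cur hcur hsys
      have hm : pvLookupD m "role" ≠ "system" := hsys m (by simp)
      have ht : ∀ x ∈ t, pvLookupD x "role" ≠ "system" := fun x hx => hsys x (by simp [hx])
      simp only [List.foldl_cons]
      by_cases hsp : pvLookupD m "role" = split_role
      · have hstep : pvStepA split_role (sm, acc, cur) m = (sm, acc ++ [cur], [m]) := by
          simp only [pvStepA]
          rw [if_neg hm, if_pos ⟨hsp, hcur⟩]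
        have hns : pvNotSplit split_role m = false := by
          simp [pvNotSplit, hsp]
        rw [hstep, ih sm (acc ++ [cur]) [m] (by simp) ht]
        simp [hns, pvChop]
      · have hstep : pvStepA split_role (sm, acc, cur) m = (sm, acc, cur ++ [m]) := by
          simp [pvStepA, hm, hsp]
        have hns : pvNotSplit split_role m = true := by
          simp [pvNotSplit, hsp]
        rw [hstep, ih sm acc (cur ++ [m]) (by simp) ht]
        simp [hns]

-- ===== VERDICT (by name: the statement is the Claim_ definition above) =====
theorem interpr_parse_messages_spec : Claim_equal_interpr_parse_messages := by
  unfold Claim_equal_interpr_parse_messages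
  intro messages split_role _ hpre
  obtain ⟨_, htail, _⟩ := hpre
  unfold Spec_interpr_parse_messages interpr_parse_messages interpr_parse_messages_alt
  rw [pvFoldl_enumerate (pvStepA split_role)]
  cases messages with
  | nil => rfl
  | cons m0 rest =>
      have htail' : ∀ x ∈ rest, pvLookupD x "role" ≠ "system" := by
        intro x hx; exact htail x (by simpa using hx)
      simp only [List.foldl_cons]
      by_cases h0 : pvLookupD m0 "role" = "system"
      · have hstep : pvStepA split_role ("", [], []) m0
            = (pvLookupD m0 "content", [], []) := by
          simp [pvStepA, h0]
        rw [hstep]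
        cases rest with
        | nil => simp [pvChop, h0]
        | cons r rs =>
            have hr : pvLookupD r "role" ≠ "system" := htail' r (by simp)
            have hrs : ∀ x ∈ rs, pvLookupD x "role" ≠ "system" :=
              fun x hx => htail' x (by simp [hx])
            have hstep2 : pvStepA split_role (pvLookupD m0 "content", [], []) r
                = (pvLookupD m0 "content", [], [r]) := by
              simp [pvStepA, hr]
            simp only [List.foldl_cons]
            rw [hstep2, pvFoldA split_role rs (pvLookupD m0 "content") [] [r] (by simp) hrs]
            simp [pvChop, h0]
      · have hstep : pvStepA split_role ("", [], []) m0 = ("", [], [m0]) := by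
          simp [pvStepA, h0]
        rw [hstep, pvFoldA split_role rest "" [] [m0] (by simp) htail']
        simp [pvChop, h0]
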